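-- pv_equiv track=rewrite | github.com/omar-alabed/parallel-arch-proj | sorting_algorithms/bitonic_merge_sort.py | bitonicMerge
-- ===== SOURCE A (Python) =====
-- def bitonicMerge(direction, arr):
--     if len(arr) == 1:
--         return arr
--     else:
--         compAndSwap(direction, arr)
--         first = bitonicMerge(direction, arr[:len(arr) // 2])
--         second = bitonicMerge(direction, arr[len(arr) // 2:])
--         return first + second
--
-- def compAndSwap(direction, arr):
--     dist = len(arr) // 2
--     for i in range(dist):
--         if (arr[i] > arr[i + dist]) == direction:
--             arr[i], arr[i + dist] = arr[i + dist], arr[i]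
-- ===== SOURCE B (Python) =====
-- def bitonicMerge(direction, arr):
--     # Iterative: one working copy + explicit stack of index ranges (A recurses on slices).
--     # Return-value equivalence only: A mutates arr in place for len(arr) >= 2, B does not.
--     n = len(arr)
--     if n <= 1:
--         return arr
--     result = arr[:]
--     stack = [(0, n)]
--     while stack:
--         lo, hi = stack.pop()
--         if hi - lo <= 1:
--             continue
--         dist = (hi - lo) // 2
--         for i in range(lo, lo + dist):
--             if (result[i] > result[i + dist]) == direction:
--                 result[i], result[i + dist] = result[i + dist], result[i]
--         stack.append((lo, lo + dist))
--         stack.append((lo + dist, hi))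
--     return result
-- ===== Notes on version B (the rewrite author's own statement) =====
-- stated objective: alternative
-- what changed: B replaces A's slice-copying recursion (compare-swap, slice both halves, recurse, concatenate) with an iterative loop over one working copy driven by an explicit stack of index ranges, doing every compare-and-swap in place; B returns [] on the empty list where A infinitely recurses (outside Pre_).
import Mathlib
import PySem

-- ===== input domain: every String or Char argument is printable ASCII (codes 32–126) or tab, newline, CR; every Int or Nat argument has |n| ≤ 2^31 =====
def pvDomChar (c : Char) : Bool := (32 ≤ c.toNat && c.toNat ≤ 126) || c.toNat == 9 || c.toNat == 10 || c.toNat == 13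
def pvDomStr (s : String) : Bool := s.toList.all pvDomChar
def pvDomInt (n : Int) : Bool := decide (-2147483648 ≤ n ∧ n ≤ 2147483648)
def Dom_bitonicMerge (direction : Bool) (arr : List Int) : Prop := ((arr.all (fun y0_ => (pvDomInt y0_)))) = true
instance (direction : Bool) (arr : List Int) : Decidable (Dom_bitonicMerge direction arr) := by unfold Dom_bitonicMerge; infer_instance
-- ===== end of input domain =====

-- B rewrites A's slice-copying recursion as an iterative loop over one working list driven by an
-- explicit stack of index ranges (alternative decomposition; return-value equivalence only:
-- Python A mutates its argument in place for len(arr) ≥ 2, B does not).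

-- ===== PORT A =====
-- step of compAndSwap's for-loop: indices i and i+dist are in range, so getD is exact
def casStep (direction : Bool) (dist : Nat) (a : List Int) (i : Nat) : List Int :=
  if (decide (a.getD i 0 > a.getD (i + dist) 0)) == direction then
    (a.set i (a.getD (i + dist) 0)).set (i + dist) (a.getD i 0)
  else a

def compAndSwap (direction : Bool) (arr : List Int) : List Int :=
  (List.range (arr.length / 2)).foldl (casStep direction (arr.length / 2)) arr

theorem casStep_length (direction : Bool) (dist : Nat) (a : List Int) (i : Nat) :
    (casStep direction dist a i).length = a.length := by
  unfold casStep; split <;> simp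

theorem foldl_casStep_length (direction : Bool) (dist : Nat) :
    ∀ (ks : List Nat) (a : List Int), (ks.foldl (casStep direction dist) a).length = a.length := by
  intro ks
  induction ks with
  | nil => intro a; rfl
  | cons k ks ih => intro a; simp only [List.foldl_cons, ih, casStep_length]

theorem compAndSwap_length (direction : Bool) (arr : List Int) :
    (compAndSwap direction arr).length = arr.length := by
  unfold compAndSwap; exact foldl_casStep_length _ _ _ _

def bitonicMerge (direction : Bool) (arr : List Int) : List Int :=
  if arr.length = 1 then arr
  else if arr.length = 0 then []   -- Python A recurses forever on []; excluded by Pre_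
  else
    let a := compAndSwap direction arr
    let first := bitonicMerge direction (a.take (a.length / 2))
    let second := bitonicMerge direction (a.drop (a.length / 2))
    first ++ second
termination_by arr.length
decreasing_by
  · simp only [List.length_take, compAndSwap_length]; omega
  · simp only [List.length_drop, compAndSwap_length]; omega

-- ===== PORT B =====
def bSwap (direction : Bool) (dist : Nat) (a : List Int) (i : Nat) : List Int :=
  if (decide (a.getD i 0 > a.getD (i + dist) 0)) == direction then
    (a.set i (a.getD (i + dist) 0)).set (i + dist) (a.getD i 0)
  else a

-- the inner for-loop of B: range(lo, lo+dist) swapping i against i+dist in place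
def segSwap (direction : Bool) (lo dist : Nat) (r : List Int) : List Int :=
  (List.range' lo dist).foldl (bSwap direction dist) r

theorem pow3_add_lt (a b : Nat) (ha : 1 ≤ a) (hb : 1 ≤ b) : 3 ^ a + 3 ^ b < 3 ^ (a + b) := by
  have h1 : 3 ^ a ≤ 3 ^ (a + b - 1) := Nat.pow_le_pow_right (by norm_num) (by omega)
  have h2 : 3 ^ b ≤ 3 ^ (a + b - 1) := Nat.pow_le_pow_right (by norm_num) (by omega)
  have h3 : 3 ^ (a + b) = 3 ^ (a + b - 1) * 3 := by
    rw [← pow_succ]; congr 1; omega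
  have h4 : 1 ≤ 3 ^ (a + b - 1) := Nat.one_le_pow _ _ (by norm_num)
  omega

-- the while-loop over the explicit stack (list head = top of stack)
def bmLoop (direction : Bool) (stack : List (Nat × Nat)) (r : List Int) : List Int :=
  match stack with
  | [] => r
  | (lo, hi) :: rest =>
    if hi - lo ≤ 1 then bmLoop direction rest r
    else
      bmLoop direction ((lo + (hi - lo) / 2, hi) :: (lo, lo + (hi - lo) / 2) :: rest)
        (segSwap direction lo ((hi - lo) / 2) r)
termination_by (stack.map (fun p => 3 ^ (p.2 - p.1))).sum
decreasing_by
  · simp only [List.map_cons, List.sum_cons]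
    have : 1 ≤ 3 ^ (hi - lo) := Nat.one_le_pow _ _ (by norm_num)
    omega
  · simp only [List.map_cons, List.sum_cons]
    have h1 : 1 ≤ (hi - lo) / 2 := by omega
    have h2 : 1 ≤ hi - (lo + (hi - lo) / 2) := by omega
    have h := pow3_add_lt (hi - (lo + (hi - lo) / 2)) ((lo + (hi - lo) / 2) - lo) h2 (by omega)
    have e1 : (lo + (hi - lo) / 2) - lo = (hi - lo) / 2 := by omega
    have e2 : hi - (lo + (hi - lo) / 2) + (lo + (hi - lo) / 2 - lo) = hi - lo := by omega
    rw [e2] at h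
    omega

def bitonicMerge_alt (direction : Bool) (arr : List Int) : List Int :=
  if arr.length ≤ 1 then arr
  else bmLoop direction [(0, arr.length)] arr

-- ===== PRECONDITION & SPEC =====
-- Pre_ excludes only the empty list, on which Python A infinitely recurses (RecursionError).
def Pre_bitonicMerge (direction : Bool) (arr : List Int) : Prop := arr ≠ []
instance (direction : Bool) (arr : List Int) : Decidable (Pre_bitonicMerge direction arr) := by
  unfold Pre_bitonicMerge; infer_instance

def pvWitness_bitonicMerge : Bool × List Int := (true, [3, 1, 4, 2])

def Spec_bitonicMerge (direction : Bool) (arr : List Int) (out : List Int) : Prop := out = bitonicMerge_alt direction arr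
instance (direction : Bool) (arr : List Int) (out : List Int) : Decidable (Spec_bitonicMerge direction arr out) := by unfold Spec_bitonicMerge; infer_instance

-- ===== CLAIM (what is proved, stated in full; the proofs are below) =====
def Claim_equal_bitonicMerge : Prop := ∀ (direction : Bool) (arr : List Int), Dom_bitonicMerge direction arr → Pre_bitonicMerge direction arr → Spec_bitonicMerge direction arr (bitonicMerge direction arr)


-- ===== LEMMAS AND PROOFS =====

theorem bSwap_eq_casStep : bSwap = casStep := rfl

-- recursive per-segment view of B's stack loop (proof helper only)
def segMerge (direction : Bool) (lo hi : Nat) (r : List Int) : List Int :=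
  if hi - lo ≤ 1 then r
  else
    segMerge direction lo (lo + (hi - lo) / 2)
      (segMerge direction (lo + (hi - lo) / 2) hi (segSwap direction lo ((hi - lo) / 2) r))
termination_by hi - lo
decreasing_by
  · omega
  · omega

theorem bmLoop_cons (direction : Bool) : ∀ (n lo hi : Nat), hi - lo ≤ n →
    ∀ (rest : List (Nat × Nat)) (r : List Int),
    bmLoop direction ((lo, hi) :: rest) r = bmLoop direction rest (segMerge direction lo hi r) := by
  intro n
  induction n with
  | zero =>
    intro lo hi h rest r
    rw [bmLoop, segMerge, if_pos (by omega : hi - lo ≤ 1), if_pos (by omega : hi - lo ≤ 1)]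
  | succ n ih =>
    intro lo hi h rest r
    by_cases h1 : hi - lo ≤ 1
    · rw [bmLoop, segMerge, if_pos h1, if_pos h1]
    · rw [bmLoop, if_neg h1]
      rw [ih (lo + (hi - lo) / 2) hi (by omega)]
      rw [ih lo (lo + (hi - lo) / 2) (by omega)]
      conv_rhs => rw [segMerge]
      rw [if_neg h1]

theorem set_middle (p s q : List Int) (k : Nat) (v : Int) (hk : k < s.length) :
    (p ++ (s ++ q)).set (p.length + k) v = p ++ (s.set k v ++ q) := by
  rw [List.set_append_right _ v (Nat.le_add_right _ _), Nat.add_sub_cancel_left,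
      List.set_append_left _ v hk]

theorem getD_middle (p s q : List Int) (k : Nat) (hk : k < s.length) :
    (p ++ (s ++ q)).getD (p.length + k) 0 = s.getD k 0 := by
  rw [List.getD_append_right p (s ++ q) 0 _ (Nat.le_add_right _ _), Nat.add_sub_cancel_left,
      List.getD_append s q 0 k hk]

theorem casStep_middle (direction : Bool) (dist : Nat) (p s q : List Int) (k : Nat)
    (hk : k + dist < s.length) :
    casStep direction dist (p ++ (s ++ q)) (p.length + k) = p ++ (casStep direction dist s k ++ q) := by
  have e : p.length + k + dist = p.length + (k + dist) := by omega
  unfold casStep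
  rw [e, getD_middle p s q k (by omega), getD_middle p s q (k + dist) hk]
  split
  · rw [set_middle p s q k _ (by omega)]
    rw [set_middle p (s.set k (s.getD (k + dist) 0)) q (k + dist) _ (by simp; omega)]
  · rfl

theorem foldl_cas_middle (direction : Bool) (dist : Nat) :
    ∀ (ks : List Nat) (p s q : List Int), (∀ k ∈ ks, k + dist < s.length) →
    ks.foldl (fun a k => casStep direction dist a (p.length + k)) (p ++ (s ++ q)) =
      p ++ (ks.foldl (casStep direction dist) s ++ q) := by
  intro ks
  induction ks with
  | nil => intro p s q _; rfl
  | cons k ks ih =>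
    intro p s q h
    simp only [List.foldl_cons]
    rw [casStep_middle direction dist p s q k (h k (by simp))]
    exact ih p (casStep direction dist s k) q (by intro j hj; rw [casStep_length]; exact h j (by simp [hj]))

theorem segSwap_middle (direction : Bool) (p s q : List Int) (hs : 2 ≤ s.length) :
    segSwap direction p.length (s.length / 2) (p ++ (s ++ q)) =
      p ++ (compAndSwap direction s ++ q) := by
  unfold segSwap compAndSwap
  rw [bSwap_eq_casStep, List.range'_eq_map_range, List.foldl_map]
  exact foldl_cas_middle direction (s.length / 2) (List.range (s.length / 2)) p s q
    (by intro k hk; simp only [List.mem_range] at hk; omega)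

theorem segMerge_local (direction : Bool) :
    ∀ (n : Nat) (p s q : List Int), 1 ≤ s.length → s.length ≤ n →
    segMerge direction p.length (p.length + s.length) (p ++ (s ++ q)) =
      p ++ (bitonicMerge direction s ++ q) := by
  intro n
  induction n with
  | zero => intro p s q hs1 hs2; omega
  | succ n ih =>
    intro p s q hs1 hs2
    by_cases hL : s.length = 1
    · rw [segMerge, if_pos (by omega), bitonicMerge, if_pos hL]
    · have hL2 : 2 ≤ s.length := by omega
      rw [segMerge, if_neg (by omega)]
      simp only [Nat.add_sub_cancel_left]
      rw [segSwap_middle direction p s q hL2]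
      have hlcs : (compAndSwap direction s).length = s.length := compAndSwap_length direction s
      have hsplit : p ++ (compAndSwap direction s ++ q) =
          (p ++ (compAndSwap direction s).take (s.length / 2)) ++
            ((compAndSwap direction s).drop (s.length / 2) ++ q) := by
        conv_lhs => rw [← List.take_append_drop (s.length / 2) (compAndSwap direction s)]
        simp only [List.append_assoc]
      rw [hsplit]
      have hlen1 : (p ++ (compAndSwap direction s).take (s.length / 2)).length =
          p.length + s.length / 2 := by simp [hlcs]; omega
      have hinner := ih (p ++ (compAndSwap direction s).take (s.length / 2))
        ((compAndSwap direction s).drop (s.length / 2)) q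
        (by simp [hlcs]; omega) (by simp [hlcs]; omega)
      rw [hlen1] at hinner
      have e2 : p.length + s.length / 2 + ((compAndSwap direction s).drop (s.length / 2)).length =
          p.length + s.length := by simp [hlcs]; omega
      rw [e2] at hinner
      rw [hinner]
      have houter := ih p ((compAndSwap direction s).take (s.length / 2))
        (bitonicMerge direction ((compAndSwap direction s).drop (s.length / 2)) ++ q)
        (by simp [hlcs]; omega) (by simp [hlcs]; omega)
      have e3 : ((compAndSwap direction s).take (s.length / 2)).length = s.length / 2 := by
        simp [hlcs]; omega
      rw [e3] at houter
      have e4 : (p ++ (compAndSwap direction s).take (s.length / 2)) ++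
          (bitonicMerge direction ((compAndSwap direction s).drop (s.length / 2)) ++ q) =
          p ++ ((compAndSwap direction s).take (s.length / 2) ++
            (bitonicMerge direction ((compAndSwap direction s).drop (s.length / 2)) ++ q)) := by
        simp only [List.append_assoc]
      rw [e4, houter]
      have hbm : bitonicMerge direction s =
          bitonicMerge direction ((compAndSwap direction s).take ((compAndSwap direction s).length / 2)) ++
            bitonicMerge direction ((compAndSwap direction s).drop ((compAndSwap direction s).length / 2)) := by
        rw [bitonicMerge, if_neg hL, if_neg (by omega)]
      rw [hbm, hlcs]
      simp [List.append_assoc]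

-- ===== VERDICT (by name: the statement is the Claim_ definition above) =====
theorem bitonicMerge_spec : Claim_equal_bitonicMerge := by
  intro direction arr _ hpre
  show bitonicMerge direction arr = bitonicMerge_alt direction arr
  have hlen : 1 ≤ arr.length := by
    cases arr with
    | nil => exact absurd rfl hpre
    | cons x xs => simp
  by_cases h1 : arr.length = 1
  · rw [bitonicMerge, if_pos h1]
    unfold bitonicMerge_alt
    rw [if_pos (by omega)]
  · unfold bitonicMerge_alt
    rw [if_neg (by omega)]
    rw [bmLoop_cons direction arr.length 0 arr.length (by omega)]
    rw [bmLoop]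
    have h := segMerge_local direction arr.length [] arr [] (by omega) (le_refl _)
    simp only [List.length_nil, List.nil_append, List.append_nil, Nat.zero_add] at h
    rw [h]
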